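-- pv_equiv track=rewrite | github.com/DictXiong/AllReduce-Over-MPI | topo_count/factor_count.py | get_factor_count
-- ===== SOURCE A (Python) =====
-- def get_factor_count(num:int):
--     if num == 0:
--         return 0
--     elif num == 1:
--         return 1
--     else:
--         ans = 0
--         for i in range(2, num + 1):
--             if num % i == 0:
--                 ans += get_factor_count(int(num / i))
--         return ans
-- ===== SOURCE B (Python) =====
-- def get_factor_count(num: int):
--     if num < 1:
--         return 0
--     divs = []
--     i = 1
--     while i * i <= num:
--         if num % i == 0:
--             divs.append(i)
--             if i != num // i:
--                 divs.append(num // i)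
--         i += 1
--     divs.sort()
--     memo = {1: 1}
--     for d in divs:
--         if d == 1:
--             continue
--         memo[d] = sum(memo[e] for e in divs if e < d and d % e == 0)
--     return memo[num]
-- ===== Notes on version B (the rewrite author's own statement) =====
-- stated objective: faster
-- what changed: Replaces the naive exponential recursion with a bottom-up DP: enumerate all divisors of num in O(sqrt(num)), sort them, and fill a memo table over divisors using f(d) = sum of f(e) over divisors e<d of d.
import Mathlib
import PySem

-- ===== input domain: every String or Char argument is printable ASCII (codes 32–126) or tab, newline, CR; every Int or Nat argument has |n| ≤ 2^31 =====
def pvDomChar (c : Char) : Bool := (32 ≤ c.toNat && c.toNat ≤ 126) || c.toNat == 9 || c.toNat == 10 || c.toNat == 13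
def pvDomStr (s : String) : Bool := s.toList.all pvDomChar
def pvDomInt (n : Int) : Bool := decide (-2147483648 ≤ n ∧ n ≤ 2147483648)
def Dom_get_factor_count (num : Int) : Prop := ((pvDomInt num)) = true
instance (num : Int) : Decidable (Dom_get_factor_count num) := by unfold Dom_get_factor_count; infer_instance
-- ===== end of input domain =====

-- B replaces A's naive exponential recursion by a bottom-up dynamic program over the divisors
-- of num (found by trial division up to √num), which is asymptotically faster.

-- ===== PORT A =====
-- fuel makes the recursion structurally total; num.toNat + 1 is always enough (proved below).
-- 'int(num / i)' is taken only when i divides num (both positive, ≤ 2^31 < 2^53), where float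
-- true division is exact, so it is ported as floor division.
def gfcA : Nat → Int → Int
  | 0, _ => 0
  | fuel+1, num =>
    if num = 0 then 0
    else if num = 1 then 1
    else (PySem.List.pyRange 2 (num+1) 1).foldl
      (fun ans i => if PySem.Int.mod num i = 0 then ans + gfcA fuel (PySem.Int.floordiv num i) else ans) 0

def get_factor_count (num : Int) : Int := gfcA (num.toNat + 1) num

-- ===== PORT B =====
-- the while loop collecting divisor pairs (i, num // i) for i*i ≤ num
def gfcDivs (num i : Int) : List Int :=
  if i * i ≤ num then
    (if PySem.Int.mod num i = 0 then
      [i] ++ (if i ≠ PySem.Int.floordiv num i then [PySem.Int.floordiv num i] else [])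
    else []) ++ gfcDivs num (i+1)
  else []
termination_by (num + 1 - i).toNat
decreasing_by
  have h0 : (0:Int) ≤ i * i := mul_self_nonneg i
  have hi : i ≤ num := by
    by_cases h : i ≤ 0
    · omega
    · nlinarith
  omega

-- sum(memo[e] for e in divs if e < d and d % e == 0)
def gfcSum (m : PySem.Dict Int Int) (divs : List Int) (d : Int) : Int :=
  (divs.filter (fun e => decide (e < d) && decide (PySem.Int.mod d e = 0))).foldl
    (fun s e => s + m.getD e 0) 0

def get_factor_count_alt (num : Int) : Int :=
  if num < 1 then 0
  else
    let divs := PySem.List.sorted (gfcDivs num 1) (fun x => x) false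
    let memo := divs.foldl
      (fun m d => if d = 1 then m else m.insert d (gfcSum m divs d))
      (PySem.Dict.ofList [((1:Int), (1:Int))])
    memo.getD num 0

-- ===== PRECONDITION & SPEC =====
def Spec_get_factor_count (num : Int) (out : Int) : Prop := out = get_factor_count_alt num
instance (num : Int) (out : Int) : Decidable (Spec_get_factor_count num out) := by unfold Spec_get_factor_count; infer_instance

-- ===== CLAIM (what is proved, stated in full; the proofs are below) =====
def Claim_equal_get_factor_count : Prop := ∀ (num : Int), Dom_get_factor_count num → Spec_get_factor_count num (get_factor_count num)

-- ===== LEMMAS AND PROOFS =====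

-- canonical spec: number of ordered factorizations into factors ≥ 2 (S 0 = 0, S 1 = 1)
def S (n : Nat) : Int :=
  if n ≤ 1 then (n : Int)
  else ∑ d ∈ n.properDivisors.attach, S d.1
termination_by n
decreasing_by exact (Nat.mem_properDivisors.mp d.2).2

theorem S_zero : S 0 = 0 := by rw [S]; simp
theorem S_one : S 1 = 1 := by rw [S]; simp

theorem S_ge_two {n : Nat} (h : 2 ≤ n) : S n = ∑ d ∈ n.properDivisors, S d := by
  rw [S, if_neg (by omega), Finset.sum_attach]


-- ===== arithmetic helpers =====

theorem floordiv_exact {a b : Int} (h : PySem.Int.mod a b = 0) : PySem.Int.floordiv a b * b = a := by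
  have h2 := PySem.Int.floordiv_mul_add_mod a b
  rw [h] at h2; linarith

theorem dvd_of_pymod_eq_zero {a b : Int} (h : PySem.Int.mod a b = 0) : b ∣ a :=
  ⟨PySem.Int.floordiv a b, by have := floordiv_exact h; linarith [mul_comm b (PySem.Int.floordiv a b)]⟩

theorem pymod_eq_zero_of_dvd {a b : Int} (hb : 0 < b) (h : b ∣ a) : PySem.Int.mod a b = 0 := by
  rw [PySem.Int.mod_eq_emod_of_pos hb]
  exact Int.emod_eq_zero_of_dvd h

theorem le_floordiv_self {num j : Int} (h1 : 0 < j) (h2 : j * j ≤ num) : j ≤ PySem.Int.floordiv num j := by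
  rw [PySem.Int.le_floordiv_iff_mul_le h1]
  exact h2

-- the ℕ-side divisor-sum identity behind both programs
theorem divisor_sum_eq (nn : Nat) (h2 : 2 ≤ nn) :
    ∑ j ∈ Finset.Ico 2 (nn+1), (if j ∣ nn then S (nn / j) else 0) = S nn := by
  rw [← Finset.sum_filter]
  have hset : (Finset.Ico 2 (nn+1)).filter (· ∣ nn) = nn.divisors.erase 1 := by
    ext j
    simp only [Finset.mem_filter, Finset.mem_Ico, Finset.mem_erase, Nat.mem_divisors]
    constructor
    · rintro ⟨⟨hj2, hjlt⟩, hjd⟩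
      exact ⟨by omega, hjd, by omega⟩
    · rintro ⟨hne, hjd, -⟩
      have hj1 : 1 ≤ j := Nat.pos_of_dvd_of_pos hjd (by omega)
      have hjle : j ≤ nn := Nat.le_of_dvd (by omega) hjd
      exact ⟨⟨by omega, by omega⟩, hjd⟩
  rw [hset]
  have h1mem : 1 ∈ nn.divisors := Nat.one_mem_divisors.mpr (by omega)
  have hkey := Finset.sum_erase_add nn.divisors (fun j => S (nn / j)) h1mem
  simp only [Nat.div_one] at hkey
  have hdiv : ∑ j ∈ nn.divisors, S (nn / j) = ∑ j ∈ nn.divisors, S j := Nat.sum_div_divisors nn S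
  have hins : nn.divisors = insert nn nn.properDivisors := (Nat.insert_self_properDivisors (by omega)).symm
  have hnotmem : nn ∉ nn.properDivisors := by simp [Nat.mem_properDivisors]
  have hsum : ∑ j ∈ nn.divisors, S j = (∑ j ∈ nn.properDivisors, S j) + S nn := by
    rw [hins, Finset.sum_insert hnotmem]; ring
  have hS : S nn = ∑ j ∈ nn.properDivisors, S j := S_ge_two h2
  linarith

-- ===== A side =====

theorem gfcA_eq : ∀ (nn : Nat) (num : Int), num.toNat = nn → ∀ fuel, nn < fuel →
    gfcA fuel num = S num.toNat := by
  intro nn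
  induction nn using Nat.strong_induction_on with
  | _ nn IH =>
    intro num hnn fuel hf
    match fuel, hf with
    | f+1, hf =>
      by_cases h0 : num = 0
      · subst h0; simp [gfcA, S_zero]
      by_cases h1 : num = 1
      · subst h1; simp [gfcA, S_one]
      simp only [gfcA, if_neg h0, if_neg h1]
      by_cases hneg : num < 0
      · rw [PySem.List.pyRange_one_eq_nil (by omega)]
        have hz : num.toNat = 0 := by omega
        rw [hz, S_zero]
        simp
      have h2 : 2 ≤ num := by omega
      have hnn2 : 2 ≤ nn := by omega
      have hcast : num = (nn : Int) := by omega
      have hcongr : ∀ (acc : Int) (x : Int), x ∈ PySem.List.pyRange 2 (num+1) 1 →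
          (if PySem.Int.mod num x = 0 then acc + gfcA f (PySem.Int.floordiv num x) else acc)
            = acc + (if PySem.Int.mod num x = 0 then S ((PySem.Int.floordiv num x).toNat) else 0) := by
        intro acc x hx
        rw [PySem.List.mem_pyRange_one] at hx
        by_cases hm : PySem.Int.mod num x = 0
        · rw [if_pos hm, if_pos hm]
          congr 1
          have hqx : PySem.Int.floordiv num x * x = num := floordiv_exact hm
          set q := PySem.Int.floordiv num x with hq
          have hq1 : 1 ≤ q := by nlinarith
          have hqlt : q < num := by nlinarith
          exact IH q.toNat (by omega) q rfl f (by omega)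
        · rw [if_neg hm, if_neg hm, add_zero]
      rw [PySem.List.foldl_congr_mem _ _
        (fun ans i => ans + (if PySem.Int.mod num i = 0 then S ((PySem.Int.floordiv num i).toNat) else 0))
        _ hcongr]
      rw [PySem.List.foldl_add, zero_add, PySem.List.pyRange_one, List.map_map, hcast]
      simp only [Int.toNat_natCast]
      have hkey := divisor_sum_eq nn hnn2
      rw [Finset.sum_Ico_eq_sum_range] at hkey
      rw [show (((nn:Int) + 1) - 2).toNat = nn + 1 - 2 from by omega]
      rw [← List.sum_toFinset _ (List.nodup_range), List.toFinset_range]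
      rw [← hkey]
      apply Finset.sum_congr rfl
      intro i hi
      simp only [Function.comp]
      have hj : ((2:Int) + (i:Int)) = ((2 + i : ℕ) : Int) := by push_cast; ring
      rw [hj, PySem.Int.mod_natCast, PySem.Int.floordiv_natCast, Int.toNat_natCast]
      by_cases hd : (2 + i) ∣ nn
      · rw [if_pos (Nat.cast_eq_zero.mpr (Nat.mod_eq_zero_of_dvd hd)), if_pos hd]
      · rw [if_neg (fun hc => hd (Nat.dvd_of_mod_eq_zero (Nat.cast_eq_zero.mp hc))), if_neg hd]

theorem A_eq_S (num : Int) : get_factor_count num = S num.toNat := by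
  exact gfcA_eq num.toNat num rfl (num.toNat + 1) (Nat.lt_succ_self _)

-- ===== B side =====

theorem mem_gfcDivs (num : Int) : ∀ (k : Nat) (i : Int), (num + 1 - i).toNat = k → 1 ≤ i →
    ∀ d, d ∈ gfcDivs num i ↔
      ∃ j, i ≤ j ∧ j * j ≤ num ∧ PySem.Int.mod num j = 0 ∧
        (d = j ∨ d = PySem.Int.floordiv num j) := by
  intro k
  induction k using Nat.strong_induction_on with
  | _ k IH =>
    intro i hk hi d
    rw [gfcDivs]
    by_cases h : i * i ≤ num
    · have hii : i ≤ num := by nlinarith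
      have hrest := IH (num + 1 - (i+1)).toNat (by omega) (i+1) rfl (by omega) d
      rw [if_pos h]
      simp only [List.mem_append]
      rw [hrest]
      constructor
      · rintro (hb | ⟨j, hj1, hj2, hj3, hj4⟩)
        · by_cases hm : PySem.Int.mod num i = 0
          · rw [if_pos hm] at hb
            refine ⟨i, le_refl i, h, hm, ?_⟩
            simp only [List.mem_append, List.mem_singleton] at hb
            rcases hb with hb | hb
            · exact Or.inl hb
            · split at hb
              · simp at hb; exact Or.inr hb
              · simp at hb
          · rw [if_neg hm] at hb; simp at hb
        · exact ⟨j, by omega, hj2, hj3, hj4⟩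
      · rintro ⟨j, hj1, hj2, hj3, hj4⟩
        rcases eq_or_lt_of_le hj1 with heq | hlt
        · subst heq
          left
          rw [if_pos hj3]
          simp only [List.mem_append, List.mem_singleton]
          rcases hj4 with rfl | rfl
          · exact Or.inl rfl
          · by_cases he : i = PySem.Int.floordiv num i
            · exact Or.inl he.symm
            · right; rw [if_pos (Ne.symm (fun hx => he hx.symm))]
              · simp
        · right; exact ⟨j, by omega, hj2, hj3, hj4⟩
    · rw [if_neg h]
      simp only [List.not_mem_nil, false_iff, not_exists]
      intro j hj
      have : i * i ≤ j * j := mul_le_mul hj.1 hj.1 (by omega) (by omega)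
      exact absurd hj.2.1 (by omega)

theorem nodup_gfcDivs (num : Int) (hnum : 1 ≤ num) :
    ∀ (k : Nat) (i : Int), (num + 1 - i).toNat = k → 1 ≤ i → (gfcDivs num i).Nodup := by
  intro k
  induction k using Nat.strong_induction_on with
  | _ k IH =>
    intro i hk hi
    rw [gfcDivs]
    by_cases h : i * i ≤ num
    · rw [if_pos h]
      have hii : i ≤ num := by nlinarith
      have hrest : (gfcDivs num (i+1)).Nodup := IH (num+1-(i+1)).toNat (by omega) (i+1) rfl (by omega)
      have hmem_rest := mem_gfcDivs num (num+1-(i+1)).toNat (i+1) rfl (by omega)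
      refine List.Nodup.append ?hb hrest ?hd
      case hb =>
        by_cases hm : PySem.Int.mod num i = 0
        · rw [if_pos hm]
          by_cases hq : i ≠ PySem.Int.floordiv num i
          · rw [if_pos hq]
            simp only [List.singleton_append, List.nodup_cons, List.mem_singleton]
            exact ⟨hq, by simp, List.nodup_nil⟩
          · rw [if_neg hq]
            simp
        · rw [if_neg hm]
          simp
      case hd =>
        intro a ha har
        rw [hmem_rest a] at har
        obtain ⟨j, hj1, hjj, hjm, hjd⟩ := har
        have hjq : PySem.Int.floordiv num j * j = num := floordiv_exact hjm
        have hjle : j ≤ PySem.Int.floordiv num j := le_floordiv_self (by omega) hjj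
        by_cases hm : PySem.Int.mod num i = 0
        · rw [if_pos hm] at ha
          have hiq : PySem.Int.floordiv num i * i = num := floordiv_exact hm
          simp only [List.singleton_append, List.mem_cons] at ha
          rcases ha with rfl | ha
          · -- a = i
            rcases hjd with rfl | heq
            · omega
            · omega
          · have haq : a = PySem.Int.floordiv num i := by
              split at ha
              · simpa using ha
              · simp at ha
            subst haq
            rcases hjd with heq | heq
            · -- floordiv num i = j
              rw [heq] at hiq
              have hlt : j * i < j * j := by
                apply mul_lt_mul_of_pos_left (by omega) (by omega)
              linarith
            · -- floordiv num i = floordiv num j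
              rw [heq] at hiq
              have hlt : PySem.Int.floordiv num j * i < PySem.Int.floordiv num j * j := by
                apply mul_lt_mul_of_pos_left (by omega) (by omega)
              linarith
        · rw [if_neg hm] at ha
          simp at ha
    · rw [if_neg h]
      exact List.nodup_nil

theorem mem_gfcDivs_one (num : Int) (hnum : 1 ≤ num) (d : Int) :
    d ∈ gfcDivs num 1 ↔ d ∣ num ∧ 1 ≤ d := by
  rw [mem_gfcDivs num (num + 1 - 1).toNat 1 rfl (le_refl 1) d]
  constructor
  · rintro ⟨j, hj1, hjj, hjm, hjd⟩
    have hjq : PySem.Int.floordiv num j * j = num := floordiv_exact hjm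
    have hjle : j ≤ PySem.Int.floordiv num j := le_floordiv_self (by omega) hjj
    rcases hjd with rfl | rfl
    · exact ⟨dvd_of_pymod_eq_zero hjm, hj1⟩
    · exact ⟨⟨j, by linarith [mul_comm (PySem.Int.floordiv num j) j]⟩, by omega⟩
  · rintro ⟨⟨c, hc⟩, hd1⟩
    have hc1 : 1 ≤ c := by nlinarith
    by_cases hdd : d * d ≤ num
    · exact ⟨d, hd1, hdd, pymod_eq_zero_of_dvd (by omega) ⟨c, hc⟩, Or.inl rfl⟩
    · refine ⟨c, hc1, by nlinarith, pymod_eq_zero_of_dvd (by omega) ⟨d, by linarith [mul_comm c d, hc]⟩, Or.inr ?_⟩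
      have : PySem.Int.floordiv num c = d := by
        rw [PySem.Int.floordiv_eq_iff_of_pos (by omega)]
        constructor
        · nlinarith
        · nlinarith
      omega

theorem gfcSum_eq (num : Int) (hnum : 1 ≤ num) (divs : List Int)
    (hmem : ∀ e, e ∈ divs ↔ e ∣ num ∧ 1 ≤ e) (hnd : divs.Nodup)
    (d : Int) (hd : d ∣ num) (hd2 : 2 ≤ d)
    (m : PySem.Dict Int Int)
    (hm : ∀ e, e ∣ num → 1 ≤ e → e < d → m.getD e 0 = S e.toNat) :
    gfcSum m divs d = S d.toNat := by
  unfold gfcSum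
  rw [PySem.List.foldl_add, zero_add]
  set l := divs.filter (fun e => decide (e < d) && decide (PySem.Int.mod d e = 0)) with hl
  have hlmem : ∀ e, e ∈ l ↔ (e ∣ num ∧ 1 ≤ e) ∧ e < d ∧ e ∣ d := by
    intro e
    rw [hl, List.mem_filter]
    simp only [Bool.and_eq_true, decide_eq_true_eq]
    constructor
    · rintro ⟨hin, hlt, hmod⟩
      exact ⟨(hmem e).mp hin, hlt, dvd_of_pymod_eq_zero hmod⟩
    · rintro ⟨hin, hlt, hdvd⟩
      exact ⟨(hmem e).mpr hin, hlt, pymod_eq_zero_of_dvd (by omega) hdvd⟩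
  have hmap : l.map (fun e => m.getD e 0) = l.map (fun e => S e.toNat) := by
    apply List.map_congr_left
    intro e he
    obtain ⟨⟨hd1, hd2⟩, hd3, _⟩ := (hlmem e).mp he
    exact hm e hd1 hd2 hd3
  rw [hmap]
  have hlnd : l.Nodup := hnd.filter _
  have hl'nd : (l.map Int.toNat).Nodup := by
    apply List.Nodup.map_on ?_ hlnd
    intro x hx y hy hxy
    have h1 := ((hlmem x).mp hx).1.2
    have h2 := ((hlmem y).mp hy).1.2
    omega
  have hcomp : l.map (fun e => S e.toNat) = (l.map Int.toNat).map S := by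
    rw [List.map_map]; rfl
  rw [hcomp, ← List.sum_toFinset _ hl'nd]
  have hfin : (l.map Int.toNat).toFinset = d.toNat.properDivisors := by
    ext x
    simp only [List.mem_toFinset, List.mem_map, Nat.mem_properDivisors]
    constructor
    · rintro ⟨e, he, rfl⟩
      obtain ⟨⟨he1, he2⟩, he3, he4⟩ := (hlmem e).mp he
      have hecast : e = ((e.toNat : Nat) : Int) := by omega
      constructor
      · rw [← Int.natCast_dvd_natCast]
        rw [← hecast]
        rw [show ((d.toNat : Nat) : Int) = d from by omega]
        exact he4
      · omega
    · rintro ⟨hdvd, hlt⟩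
      have hx1 : 1 ≤ x := by
        rcases Nat.eq_zero_or_pos x with rfl | h
        · rcases hdvd with ⟨c, hc⟩
          omega
        · omega
      refine ⟨(x : Int), ?_, by omega⟩
      rw [hlmem]
      have hxd : (x : Int) ∣ d := by
        have := Int.natCast_dvd_natCast.mpr hdvd
        rwa [show ((d.toNat : Nat) : Int) = d from by omega] at this
      exact ⟨⟨dvd_trans hxd hd, by omega⟩, by omega, hxd⟩
  rw [hfin]
  exact (S_ge_two (by omega)).symm

theorem dp_loop (num : Int) (hnum : 1 ≤ num) (divs : List Int)
    (hmem : ∀ e, e ∈ divs ↔ e ∣ num ∧ 1 ≤ e) (hnd : divs.Nodup) :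
    ∀ (todo : List Int) (m : PySem.Dict Int Int) (lo : Int),
      2 ≤ lo →
      todo.Pairwise (· < ·) →
      (∀ d ∈ todo, d ∣ num ∧ 1 ≤ d) →
      (∀ d, d ∣ num → lo ≤ d → d ∈ todo) →
      (∀ d ∈ todo, d = 1 ∨ lo ≤ d) →
      (∀ e, e ∣ num → 1 ≤ e → e < lo → m.getD e 0 = S e.toNat) →
      ∀ e, e ∣ num → 1 ≤ e →
        (todo.foldl (fun m d => if d = 1 then m else m.insert d (gfcSum m divs d)) m).getD e 0
          = S e.toNat := by
  intro todo
  induction todo with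
  | nil =>
    intro m lo hlo hpw hdv hcompl hloel hP e he1 he2
    simp only [List.foldl_nil]
    by_cases hcase : e < lo
    · exact hP e he1 he2 hcase
    · exact absurd (hcompl e he1 (by omega)) (List.not_mem_nil)
  | cons d rest IHt =>
    intro m lo hlo hpw hdv hcompl hloel hP e he1 he2
    simp only [List.foldl_cons]
    by_cases hd1 : d = 1
    · rw [if_pos hd1]
      refine IHt m lo hlo hpw.of_cons (fun x hx => hdv x (List.mem_cons_of_mem d hx)) ?_ (fun x hx => hloel x (List.mem_cons_of_mem d hx)) hP e he1 he2
      intro x hx1 hx2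
      have : x ∈ d :: rest := hcompl x hx1 hx2
      rcases List.mem_cons.mp this with rfl | hmem
      · omega
      · exact hmem
    · rw [if_neg hd1]
      have hdlo : lo ≤ d := by
        rcases hloel d (List.mem_cons_self) with h | h
        · exact absurd h hd1
        · exact h
      have hdd := hdv d (List.mem_cons_self)
      have hPd : ∀ x, x ∣ num → 1 ≤ x → x < d → m.getD x 0 = S x.toNat := by
        intro x hx1 hx2 hx3
        by_cases hxlo : x < lo
        · exact hP x hx1 hx2 hxlo
        · exfalso
          have hxin : x ∈ d :: rest := hcompl x hx1 (by omega)
          rcases List.mem_cons.mp hxin with rfl | hmem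
          · omega
          · have := (List.pairwise_cons.mp hpw).1 x hmem
            omega
      have hsum : gfcSum m divs d = S d.toNat :=
        gfcSum_eq num hnum divs hmem hnd d hdd.1 (by omega) m hPd
      rw [hsum]
      refine IHt (m.insert d (S d.toNat)) (d+1) (by omega) hpw.of_cons
        (fun x hx => hdv x (List.mem_cons_of_mem d hx)) ?_ ?_ ?_ e he1 he2
      · intro x hx1 hx2
        have hxin : x ∈ d :: rest := hcompl x hx1 (by omega)
        rcases List.mem_cons.mp hxin with rfl | hmem
        · omega
        · exact hmem
      · intro x hx
        have := (List.pairwise_cons.mp hpw).1 x hx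
        omega
      · intro x hx1 hx2 hx3
        by_cases hxd : x = d
        · subst hxd
          rw [PySem.Dict.getD_insert_self]
        · rw [PySem.Dict.getD_insert_of_ne _ _ _ hxd]
          exact hPd x hx1 hx2 (by omega)

theorem B_eq_S (num : Int) : get_factor_count_alt num = S num.toNat := by
  unfold get_factor_count_alt
  by_cases h : num < 1
  · rw [if_pos h, show num.toNat = 0 from by omega, S_zero]
  · rw [if_neg h]
    have hnum : 1 ≤ num := by omega
    dsimp only
    set sd := PySem.List.sorted (gfcDivs num 1) (fun x => x) false with hsd
    have hperm := PySem.List.sorted_perm (gfcDivs num 1) (fun x => x) false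
    have hmem : ∀ e, e ∈ sd ↔ e ∣ num ∧ 1 ≤ e := by
      intro e
      rw [hsd, PySem.List.mem_sorted]
      exact mem_gfcDivs_one num hnum e
    have hnd : sd.Nodup :=
      (List.Perm.nodup_iff hperm).mpr (nodup_gfcDivs num hnum (num + 1 - 1).toNat 1 rfl (le_refl 1))
    have hpw : sd.Pairwise (· < ·) := by
      have hle : sd.Pairwise (fun a b => a ≤ b) := PySem.List.sorted_pairwise (gfcDivs num 1) (fun x => x) 
      exact (hle.and hnd).imp (fun h => lt_of_le_of_ne h.1 h.2)
    have hinit : ∀ e, e ∣ num → 1 ≤ e → e < 2 →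
        (PySem.Dict.ofList [((1:Int), (1:Int))]).getD e 0 = S e.toNat := by
      intro e he1 he2 he3
      rw [show e = 1 from by omega]
      rw [show ((PySem.Dict.ofList [((1:Int), (1:Int))]).getD 1 0) = 1 from rfl]
      rw [show ((1:Int).toNat) = 1 from rfl, S_one]
    have := dp_loop num hnum sd hmem hnd sd
      (PySem.Dict.ofList [((1:Int), (1:Int))]) 2 (by omega) hpw
      (fun d hd => (hmem d).mp hd)
      (fun d h1 h2 => (hmem d).mpr ⟨h1, by omega⟩)
      (fun d hd => by have := ((hmem d).mp hd).2; omega)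
      hinit num dvd_rfl hnum
    exact this

-- ===== VERDICT (by name: the statement is the Claim_ definition above) =====
theorem get_factor_count_spec : Claim_equal_get_factor_count := by
  intro num _
  unfold Spec_get_factor_count
  rw [A_eq_S, B_eq_S]
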